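-- pv_equiv track=rewrite | github.com/ericzhang98/competitive | codejam/kickstart_2022/round_b/d_pypy.py | solution
-- ===== SOURCE A (Python) =====
-- def solution(A, R, C):
--     dij = [(-1,0), (1,0), (0,-1), (0,1)]
--
--     all_valid = set()
--     for i in range(R):
--         for j in range(C):
--             if A[i][j] == '*':
--                 all_valid.add((i,j))
--     def check_valid():
--         visited = set()
--         def dfs(i,j):
--             if (i,j) in visited:
--                 return
--             visited.add((i,j))
--             for di, dj in dij:
--                 i2, j2 = i+di, j+dj
--                 if 0<=i2<R and 0<=j2<C and A[i2][j2] == '*' and (i2,j2):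
--                     dfs(i2,j2)
--         dfs(0,0)
--         return visited == all_valid
--     if not check_valid():
--         return "IMPOSSIBLE"
--
--     # cycle expansion dfs via pointers
--     pointers = [[''] * (2*C) for _ in range(2*R)]
--     for i in range(R):
--         for j in range(C):
--             pointers[2*i][2*j] = 'S'
--             pointers[2*i+1][2*j] = 'E'
--             pointers[2*i+1][2*j+1] = 'N'
--             pointers[2*i][2*j+1] = 'W'
--     visited = {(0,0)}
--     def dfs(i, j):
--         assert (i,j) in visited
--         for di, dj in dij:
--             i2, j2 = i+di, j+dj
--             if 0<=i2<R and 0<=j2<C and A[i2][j2] == '*' and (i2,j2) not in visited: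
--                 visited.add((i2,j2))
--                 if (di,dj) == (1,0):
--                     pointers[2*i+1][2*j] = 'S'
--                     pointers[2*i2][2*j2+1] = 'N'
--                 elif (di,dj) == (-1,0):
--                     pointers[2*i2+1][2*j2] = 'S'
--                     pointers[2*i][2*j+1] = 'N'
--                 elif (di,dj) == (0,1):
--                     pointers[2*i+1][2*j+1] = 'E'
--                     pointers[2*i2][2*j2] = 'W'
--                 elif (di,dj) == (0,-1):
--                     pointers[2*i2+1][2*j2+1] = 'E'
--                     pointers[2*i][2*j] = 'W'
--                 else: assert False
--                 dfs(i2,j2)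
--     dfs(0,0)
--     assert visited == all_valid
--
--     ans = []
--     curx, cury = 0,0
--     while True:
--         direction = pointers[curx][cury]
--         ans.append(direction)
--         if direction == 'S':
--             curx += 1
--         elif direction == 'N':
--             curx -= 1
--         elif direction == 'E':
--             cury += 1
--         elif direction == 'W':
--             cury -= 1
--         else: assert False
--         if (curx, cury) == (0,0):
--             break
--     assert len(ans) == 4 * len(visited)
--
--     return "".join(ans)
-- ===== SOURCE B (Python) =====
-- def solution(A, R, C):
--     dij = [(-1,0), (1,0), (0,-1), (0,1)]
--
--     all_valid = set()
--     for i in range(R):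
--         for j in range(C):
--             if A[i][j] == '*':
--                 all_valid.add((i,j))
--
--     # one explicit-stack DFS pass: build the pointer grid while collecting the
--     # visited set, then decide IMPOSSIBLE by comparing visited with all_valid
--     pointers = [[''] * (2*C) for _ in range(2*R)]
--     for i in range(R):
--         for j in range(C):
--             pointers[2*i][2*j] = 'S'
--             pointers[2*i+1][2*j] = 'E'
--             pointers[2*i+1][2*j+1] = 'N'
--             pointers[2*i][2*j+1] = 'W'
--     visited = {(0,0)}
--     stack = [(0, 0, 0)]          # frames (i, j, next direction index)
--     while stack:
--         i, j, k = stack.pop()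
--         if k >= 4:
--             continue
--         stack.append((i, j, k+1))
--         di, dj = dij[k]
--         i2, j2 = i+di, j+dj
--         if 0<=i2<R and 0<=j2<C and A[i2][j2] == '*' and (i2,j2) not in visited:
--             visited.add((i2,j2))
--             if (di,dj) == (1,0):
--                 pointers[2*i+1][2*j] = 'S'
--                 pointers[2*i2][2*j2+1] = 'N'
--             elif (di,dj) == (-1,0):
--                 pointers[2*i2+1][2*j2] = 'S'
--                 pointers[2*i][2*j+1] = 'N'
--             elif (di,dj) == (0,1):
--                 pointers[2*i+1][2*j+1] = 'E'
--                 pointers[2*i2][2*j2] = 'W'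
--             elif (di,dj) == (0,-1):
--                 pointers[2*i2+1][2*j2+1] = 'E'
--                 pointers[2*i][2*j] = 'W'
--             else: assert False
--             stack.append((i2, j2, 0))
--     if visited != all_valid:
--         return "IMPOSSIBLE"
--
--     ans = []
--     curx, cury = 0, 0
--     while True:
--         direction = pointers[curx][cury]
--         ans.append(direction)
--         if direction == 'S':
--             curx += 1
--         elif direction == 'N':
--             curx -= 1
--         elif direction == 'E':
--             cury += 1
--         elif direction == 'W':
--             cury -= 1
--         else: assert False
--         if (curx, cury) == (0,0):
--             break
--     assert len(ans) == 4 * len(visited)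
--
--     return "".join(ans)
-- ===== Notes on version B (the rewrite author's own statement) =====
-- stated objective: alternative
-- what changed: Replaces A's two recursive DFS passes (a reachability check, then a second tree-building DFS) by a single iterative explicit-stack DFS that builds the pointer grid while it collects the visited set, deciding IMPOSSIBLE afterwards by comparing that set with all_valid.
import Mathlib
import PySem

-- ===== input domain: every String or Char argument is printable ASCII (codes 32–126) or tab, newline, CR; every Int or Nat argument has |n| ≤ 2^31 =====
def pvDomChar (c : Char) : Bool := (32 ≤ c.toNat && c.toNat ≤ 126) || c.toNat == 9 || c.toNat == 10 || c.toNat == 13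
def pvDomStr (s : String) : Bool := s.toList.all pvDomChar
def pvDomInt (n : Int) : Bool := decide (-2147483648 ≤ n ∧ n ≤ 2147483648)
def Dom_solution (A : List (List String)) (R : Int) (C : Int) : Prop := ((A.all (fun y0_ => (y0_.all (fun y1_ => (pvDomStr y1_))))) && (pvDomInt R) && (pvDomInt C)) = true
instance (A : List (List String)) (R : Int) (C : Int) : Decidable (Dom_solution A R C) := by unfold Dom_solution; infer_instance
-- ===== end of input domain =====

-- B replaces A's two recursive DFS passes by one explicit-stack DFS pass that builds the
-- pointer grid while collecting the visited set (objective: alternative decomposition).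

-- ===== PORT A =====
-- helpers shared by both ports: they transliterate Python snippets that appear VERBATIM in
-- both Source A and Source B (the dij table, A[i][j] access, the bounds-and-'*' guard, all_valid,
-- the pointer-grid initialization, the 4-branch pointer writes per tree edge, the final trace loop).

def pvDij : List (Int × Int) := [(-1,0), (1,0), (0,-1), (0,1)]

-- A[i][j] ; exact wherever the surrounding guard/Pre_solution puts the indices in range
def pvAt (A : List (List String)) (i j : Int) : String :=
  (PySem.List.pyGet? ((PySem.List.pyGet? A i).getD []) j).getD ""

-- 0<=i<R and 0<=j<C and A[i][j] == '*'   (the trailing 'and (i2,j2)' in Source A is always truthy)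
def pvOk (A : List (List String)) (R C i j : Int) : Bool :=
  decide (0 ≤ i) && decide (i < R) && decide (0 ≤ j) && decide (j < C) && (pvAt A i j == "*")

def pvAllValid (A : List (List String)) (R C : Int) : PySem.Set (Int × Int) :=
  (PySem.List.pyRange 0 R 1).foldl (fun s i =>
    (PySem.List.pyRange 0 C 1).foldl (fun s j =>
      if pvAt A i j == "*" then PySem.Set.add s (i, j) else s) s) PySem.Set.empty

-- pointers[x][y] = v  (all writes use nonnegative in-range indices, where this is exact)
def pvSet2 (g : List (List String)) (x y : Int) (v : String) : List (List String) :=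
  g.set x.toNat ((g.getD x.toNat []).set y.toNat v)

def pvInitPtrs (R C : Int) : List (List String) :=
  (PySem.List.pyRange 0 R 1).foldl (fun g i =>
    (PySem.List.pyRange 0 C 1).foldl (fun g j =>
      pvSet2 (pvSet2 (pvSet2 (pvSet2 g (2*i) (2*j) "S") (2*i+1) (2*j) "E")
        (2*i+1) (2*j+1) "N") (2*i) (2*j+1) "W") g)
    ((PySem.List.pyRange 0 (2*R) 1).map (fun _ => List.replicate (2*C).toNat ""))

-- the 4-branch pointer update performed when the DFS takes the edge (i,j) -> (i2,j2)
def pvEdge (g : List (List String)) (i j di dj i2 j2 : Int) : List (List String) :=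
  if di = 1 ∧ dj = 0 then pvSet2 (pvSet2 g (2*i+1) (2*j) "S") (2*i2) (2*j2+1) "N"
  else if di = -1 ∧ dj = 0 then pvSet2 (pvSet2 g (2*i2+1) (2*j2) "S") (2*i) (2*j+1) "N"
  else if di = 0 ∧ dj = 1 then pvSet2 (pvSet2 g (2*i+1) (2*j+1) "E") (2*i2) (2*j2) "W"
  else if di = 0 ∧ dj = -1 then pvSet2 (pvSet2 g (2*i2+1) (2*j2+1) "E") (2*i) (2*j) "W"
  else g   -- 'assert False': unreachable, pvDij only holds the four unit steps

-- the final while-True trace loop (identical source in Source A and Source B); fuel-bounded loop,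
-- the fuel-0 branch returns the letters collected so far
def pvTrace (g : List (List String)) : Nat → Int → Int → List String → List String
  | 0, _, _, ans => ans
  | f+1, x, y, ans =>
    let dir := (PySem.List.pyGet? ((PySem.List.pyGet? g x).getD []) y).getD ""
    let ans' := ans ++ [dir]
    let p : Int × Int :=
      if dir == "S" then (x+1, y) else if dir == "N" then (x-1, y)
      else if dir == "E" then (x, y+1) else if dir == "W" then (x, y-1) else (x, y)
    if p.1 = 0 ∧ p.2 = 0 then ans' else pvTrace g f p.1 p.2 ans'

def pvTraceFuel (R C : Int) : Nat := 4 * (R.toNat * C.toNat) + 4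

def pvFuel (R C : Int) : Nat := R.toNat * C.toNat + 2

-- A's first recursive dfs (the connectivity check): visited-check at entry
def pvDfs1 (A : List (List String)) (R C : Int) :
    Nat → PySem.Set (Int × Int) → Int → Int → PySem.Set (Int × Int)
  | 0, vis, _, _ => vis
  | f+1, vis, i, j =>
    if PySem.Set.contains vis (i, j) then vis
    else pvDij.foldl (fun vis d =>
      if pvOk A R C (i + d.1) (j + d.2) then pvDfs1 A R C f vis (i + d.1) (j + d.2) else vis)
      (PySem.Set.add vis (i, j))

-- A's second recursive dfs (tree building): visited-check on the edge, pointer writes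
def pvDfs2 (A : List (List String)) (R C : Int) :
    Nat → PySem.Set (Int × Int) × List (List String) → Int → Int →
    PySem.Set (Int × Int) × List (List String)
  | 0, s, _, _ => s
  | f+1, s, i, j =>
    pvDij.foldl (fun s d =>
      if pvOk A R C (i + d.1) (j + d.2) && !(PySem.Set.contains s.1 (i + d.1, j + d.2)) then
        pvDfs2 A R C f
          (PySem.Set.add s.1 (i + d.1, j + d.2), pvEdge s.2 i j d.1 d.2 (i + d.1) (j + d.2))
          (i + d.1) (j + d.2)
      else s) s

def solution (A : List (List String)) (R : Int) (C : Int) : String :=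
  let av := pvAllValid A R C
  let vis1 := pvDfs1 A R C (pvFuel R C) PySem.Set.empty 0 0
  if !(PySem.Set.equal vis1 av) then "IMPOSSIBLE"
  else
    let s := pvDfs2 A R C (pvFuel R C)
      (PySem.Set.add PySem.Set.empty (0, 0), pvInitPtrs R C) 0 0
    PySem.Str.join "" (pvTrace s.2 (pvTraceFuel R C) 0 0 [])

-- ===== PORT B =====
-- B's explicit-stack DFS: frames (i, j, k) with k the next direction index; the Lean list
-- head is the Python stack's top (stack.pop() / the two appends become the conses below)
def pvLoopFuel (R C : Int) : Nat := 6 * (R.toNat * C.toNat) + 12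

def pvLoop (A : List (List String)) (R C : Int) :
    Nat → PySem.Set (Int × Int) × List (List String) → List (Int × Int × Nat) →
    PySem.Set (Int × Int) × List (List String)
  | 0, s, _ => s
  | _+1, s, [] => s
  | m+1, s, (i, j, k) :: rest =>
    if k < 4 then
      let d := pvDij.getD k (0, 0)
      if pvOk A R C (i + d.1) (j + d.2) && !(PySem.Set.contains s.1 (i + d.1, j + d.2)) then
        pvLoop A R C m
          (PySem.Set.add s.1 (i + d.1, j + d.2), pvEdge s.2 i j d.1 d.2 (i + d.1) (j + d.2))
          ((i + d.1, j + d.2, 0) :: (i, j, k+1) :: rest)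
      else pvLoop A R C m s ((i, j, k+1) :: rest)
    else pvLoop A R C m s rest

def solution_alt (A : List (List String)) (R : Int) (C : Int) : String :=
  let av := pvAllValid A R C
  let s := pvLoop A R C (pvLoopFuel R C)
    (PySem.Set.add PySem.Set.empty (0, 0), pvInitPtrs R C) [(0, 0, 0)]
  if !(PySem.Set.equal s.1 av) then "IMPOSSIBLE"
  else PySem.Str.join "" (pvTrace s.2 (pvTraceFuel R C) 0 0 [])

-- ===== PRECONDITION & SPEC =====
-- Pre_solution excludes exactly the inputs on which Source A RAISES an IndexError: when R > 0
-- and C > 0 the grid must have at least R rows and each of the first R rows at least C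
-- entries (the all_valid loop reads A[i][j] for every 0 <= i < R, 0 <= j < C).  On every
-- other input A returns normally and B matches it.
def Pre_solution (A : List (List String)) (R : Int) (C : Int) : Prop :=
  C ≤ 0 ∨ (R.toNat ≤ A.length ∧ ∀ row ∈ A.take R.toNat, C.toNat ≤ row.length)
instance (A : List (List String)) (R : Int) (C : Int) : Decidable (Pre_solution A R C) := by
  unfold Pre_solution; infer_instance

def pvWitness_solution : List (List String) × Int × Int := ([["*", "*"], ["*", "."]], 2, 2)

def Spec_solution (A : List (List String)) (R : Int) (C : Int) (out : String) : Prop := out = solution_alt A R C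
instance (A : List (List String)) (R : Int) (C : Int) (out : String) : Decidable (Spec_solution A R C out) := by unfold Spec_solution; infer_instance

-- ===== CLAIM (what is proved, stated in full; the proofs are below) =====
def Claim_equal_solution : Prop := ∀ (A : List (List String)) (R : Int) (C : Int), Dom_solution A R C → Pre_solution A R C → Spec_solution A R C (solution A R C)

-- ===== LEMMAS AND PROOFS =====

-- the cells the two DFS passes can ever insert: (0,0) plus the grid rectangle
def pvCells (R C : Int) : List (Int × Int) :=
  ((0 : Int), (0 : Int)) :: (PySem.List.pyRange 0 R 1).flatMap
    (fun i => (PySem.List.pyRange 0 C 1).map (fun j => (i, j)))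

-- the termination measure: number of (occurrences of) cells not yet visited
def pvNu (R C : Int) (vis : PySem.Set (Int × Int)) : Nat :=
  ((pvCells R C).filter (fun c => ¬ c ∈ vis)).length

-- limit (fuel-independent) forms of the two recursive dfs's
def pvL1 (A : List (List String)) (R C : Int) (vis : PySem.Set (Int × Int)) (i j : Int) :
    PySem.Set (Int × Int) :=
  pvDfs1 A R C (pvNu R C vis + 1) vis i j

def pvL2 (A : List (List String)) (R C : Int)
    (s : PySem.Set (Int × Int) × List (List String)) (i j : Int) :
    PySem.Set (Int × Int) × List (List String) :=
  pvDfs2 A R C (pvNu R C s.1 + 1) s i j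

-- recursion-side meaning of one stack frame: fold the directions from index k
def pvFoldFrom (A : List (List String)) (R C : Int)
    (s : PySem.Set (Int × Int) × List (List String)) (i j : Int) (k : Nat) :
    PySem.Set (Int × Int) × List (List String) :=
  (pvDij.drop k).foldl (fun s d =>
    if pvOk A R C (i + d.1) (j + d.2) && !(PySem.Set.contains s.1 (i + d.1, j + d.2)) then
      pvL2 A R C
        (PySem.Set.add s.1 (i + d.1, j + d.2), pvEdge s.2 i j d.1 d.2 (i + d.1) (j + d.2))
        (i + d.1) (j + d.2)
    else s) s

-- recursion-side meaning of a whole stack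
def pvExec (A : List (List String)) (R C : Int)
    (s : PySem.Set (Int × Int) × List (List String)) :
    List (Int × Int × Nat) → PySem.Set (Int × Int) × List (List String)
  | [] => s
  | (i, j, k) :: rest => pvExec A R C (pvFoldFrom A R C s i j k) rest

-- machine measure
def pvMeasure (R C : Int) (s : PySem.Set (Int × Int) × List (List String))
    (stack : List (Int × Int × Nat)) : Nat :=
  6 * pvNu R C s.1 + (stack.map (fun fr => 6 - fr.2.2)).sum

theorem pv_ok_mem_cells (A : List (List String)) (R C i j : Int)
    (h : pvOk A R C i j = true) : (i, j) ∈ pvCells R C := by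
  simp only [pvOk, Bool.and_eq_true, decide_eq_true_eq] at h
  obtain ⟨⟨⟨⟨h1, h2⟩, h3⟩, h4⟩, _⟩ := h
  simp only [pvCells, List.mem_cons, List.mem_flatMap, List.mem_map,
    PySem.List.mem_pyRange_one]
  exact Or.inr ⟨i, ⟨h1, h2⟩, j, ⟨h3, h4⟩, rfl⟩

theorem pv_nu_le (R C : Int) (vis : PySem.Set (Int × Int)) :
    pvNu R C vis ≤ (pvCells R C).length := by
  exact List.length_filter_le _ _

theorem pv_nu_mono (R C : Int) (v w : PySem.Set (Int × Int))
    (h : ∀ x, x ∈ v → x ∈ w) : pvNu R C w ≤ pvNu R C v := by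
  exact (List.monotone_filter_right _ (fun a ha => by
    simp only [decide_eq_true_eq] at ha ⊢
    exact fun hx => ha (h a hx))).length_le

theorem pv_length_filter_lt (l : List (Int × Int)) (vis : PySem.Set (Int × Int))
    (c : Int × Int) (hc : c ∈ l) (hnv : ¬ c ∈ vis) :
    (l.filter (fun x => ¬ x ∈ PySem.Set.add vis c)).length <
      (l.filter (fun x => ¬ x ∈ vis)).length := by
  have himp : ∀ a : Int × Int, a ∈ vis → a ∈ PySem.Set.add vis c := by
    intro a ha; rw [PySem.Set.mem_add]; exact Or.inl ha
  have hcadd : c ∈ PySem.Set.add vis c := by rw [PySem.Set.mem_add]; exact Or.inr rfl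
  have hle : ∀ t : List (Int × Int),
      (t.filter (fun x => ¬ x ∈ PySem.Set.add vis c)).length ≤
        (t.filter (fun x => ¬ x ∈ vis)).length := by
    intro t
    exact (List.monotone_filter_right _ (fun x hx => by
      simp only [decide_eq_true_eq] at hx ⊢
      exact fun hmem => hx (himp x hmem))).length_le
  induction l with
  | nil => cases hc
  | cons a l ih =>
    rcases List.mem_cons.mp hc with rfl | hal
    · simp only [List.filter_cons, hcadd, hnv, not_true, not_false_iff, decide_true,
        decide_false, if_true, List.length_cons]
      exact Nat.lt_succ_of_le (hle l)
    · have hlt := ih hal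
      simp only [List.filter_cons]
      by_cases hav : a ∈ vis
      · have e1 : decide (¬ a ∈ PySem.Set.add vis c) = false := by
          simp [himp a hav]
        have e2 : decide (¬ a ∈ vis) = false := by simp [hav]
        simp only [e1, e2, Bool.false_eq_true, if_false]
        exact hlt
      · have e2 : decide (¬ a ∈ vis) = true := by simp [hav]
        by_cases haa : a ∈ PySem.Set.add vis c
        · have e1 : decide (¬ a ∈ PySem.Set.add vis c) = false := by simp [haa]
          simp only [e1, e2, Bool.false_eq_true, if_false, if_true, List.length_cons]
          omega
        · have e1 : decide (¬ a ∈ PySem.Set.add vis c) = true := by simp [haa]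
          simp only [e1, e2, if_true, List.length_cons]
          omega

theorem pv_nu_add_lt (R C : Int) (vis : PySem.Set (Int × Int)) (c : Int × Int)
    (hc : c ∈ pvCells R C) (hnv : ¬ c ∈ vis) :
    pvNu R C (PySem.Set.add vis c) < pvNu R C vis :=
  pv_length_filter_lt (pvCells R C) vis c hc hnv

theorem pv_dfs2_mono (A : List (List String)) (R C : Int) (f : Nat)
    (s : PySem.Set (Int × Int) × List (List String)) (i j : Int) :
    ∀ x, x ∈ s.1 → x ∈ (pvDfs2 A R C f s i j).1 := by
  induction f generalizing s i j with
  | zero => intro x hx; simpa [pvDfs2] using hx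
  | succ f IH =>
    intro x hx
    rw [pvDfs2]
    have aux : ∀ (ds : List (Int × Int)) (t : PySem.Set (Int × Int) × List (List String)),
        x ∈ t.1 → x ∈ (ds.foldl (fun s d =>
          if pvOk A R C (i + d.1) (j + d.2) && !(PySem.Set.contains s.1 (i + d.1, j + d.2)) then
            pvDfs2 A R C f
              (PySem.Set.add s.1 (i + d.1, j + d.2), pvEdge s.2 i j d.1 d.2 (i + d.1) (j + d.2))
              (i + d.1) (j + d.2)
          else s) t).1 := by
      intro ds
      induction ds with
      | nil => intro t ht; exact ht
      | cons d ds ihds =>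
        intro t ht
        simp only [List.foldl_cons]
        by_cases hg : (pvOk A R C (i + d.1) (j + d.2) &&
            !(PySem.Set.contains t.1 (i + d.1, j + d.2))) = true
        · rw [if_pos hg]
          refine ihds _ (IH _ _ _ x ?_)
          rw [PySem.Set.mem_add]; exact Or.inl ht
        · rw [if_neg hg]
          exact ihds t ht
    exact aux pvDij s hx

theorem pv_dfs1_mono (A : List (List String)) (R C : Int) (f : Nat)
    (vis : PySem.Set (Int × Int)) (i j : Int) :
    ∀ x, x ∈ vis → x ∈ pvDfs1 A R C f vis i j := by
  induction f generalizing vis i j with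
  | zero => intro x hx; simpa [pvDfs1] using hx
  | succ f IH =>
    intro x hx
    rw [pvDfs1]
    by_cases hv : PySem.Set.contains vis (i, j) = true
    · rw [if_pos hv]; exact hx
    · rw [if_neg hv]
      have aux : ∀ (ds : List (Int × Int)) (t : PySem.Set (Int × Int)),
          x ∈ t → x ∈ ds.foldl (fun vis d =>
            if pvOk A R C (i + d.1) (j + d.2) then pvDfs1 A R C f vis (i + d.1) (j + d.2)
            else vis) t := by
        intro ds
        induction ds with
        | nil => intro t ht; exact ht
        | cons d ds ihds =>
          intro t ht
          simp only [List.foldl_cons]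
          by_cases hg : pvOk A R C (i + d.1) (j + d.2) = true
          · rw [if_pos hg]
            exact ihds _ (IH _ _ _ x ht)
          · rw [if_neg hg]
            exact ihds t ht
      refine aux pvDij _ ?_
      rw [PySem.Set.mem_add]; exact Or.inl hx

theorem pv_stab2 (A : List (List String)) (R C : Int) :
    ∀ n (s : PySem.Set (Int × Int) × List (List String)) (i j : Int) (f f' : Nat),
      pvNu R C s.1 ≤ n → n + 1 ≤ f → n + 1 ≤ f' →
      pvDfs2 A R C f s i j = pvDfs2 A R C f' s i j := by
  intro n
  induction n using Nat.strong_induction_on with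
  | _ n IH =>
    intro s i j f f' hnu hf hf'
    obtain ⟨a, rfl⟩ : ∃ a, f = a + 1 := ⟨f - 1, by omega⟩
    obtain ⟨b, rfl⟩ : ∃ b, f' = b + 1 := ⟨f' - 1, by omega⟩
    rw [pvDfs2, pvDfs2]
    have aux : ∀ (ds : List (Int × Int)) (t : PySem.Set (Int × Int) × List (List String)),
        pvNu R C t.1 ≤ pvNu R C s.1 →
        ds.foldl (fun s d =>
          if pvOk A R C (i + d.1) (j + d.2) && !(PySem.Set.contains s.1 (i + d.1, j + d.2)) then
            pvDfs2 A R C a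
              (PySem.Set.add s.1 (i + d.1, j + d.2), pvEdge s.2 i j d.1 d.2 (i + d.1) (j + d.2))
              (i + d.1) (j + d.2)
          else s) t =
        ds.foldl (fun s d =>
          if pvOk A R C (i + d.1) (j + d.2) && !(PySem.Set.contains s.1 (i + d.1, j + d.2)) then
            pvDfs2 A R C b
              (PySem.Set.add s.1 (i + d.1, j + d.2), pvEdge s.2 i j d.1 d.2 (i + d.1) (j + d.2))
              (i + d.1) (j + d.2)
          else s) t := by
      intro ds
      induction ds with
      | nil => intro t _; rfl
      | cons d ds ihds =>
        intro t hnut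
        simp only [List.foldl_cons]
        by_cases hg : (pvOk A R C (i + d.1) (j + d.2) &&
            !(PySem.Set.contains t.1 (i + d.1, j + d.2))) = true
        · rw [Bool.and_eq_true] at hg
          obtain ⟨hok, hnc⟩ := hg
          have hnv : ¬ (i + d.1, j + d.2) ∈ t.1 := by
            rw [Bool.not_eq_true'] at hnc
            intro hmem
            rw [← PySem.Set.contains_iff t.1 (i + d.1, j + d.2)] at hmem
            rw [hmem] at hnc; cases hnc
          have hcell := pv_ok_mem_cells A R C (i + d.1) (j + d.2) hok
          set t' : PySem.Set (Int × Int) × List (List String) :=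
            (PySem.Set.add t.1 (i + d.1, j + d.2),
              pvEdge t.2 i j d.1 d.2 (i + d.1) (j + d.2)) with ht'
          have hlt : pvNu R C t'.1 < pvNu R C t.1 :=
            pv_nu_add_lt R C t.1 (i + d.1, j + d.2) hcell hnv
          have hg' : (pvOk A R C (i + d.1) (j + d.2) &&
              !(PySem.Set.contains t.1 (i + d.1, j + d.2))) = true := by
            rw [Bool.and_eq_true]; exact ⟨hok, hnc⟩
          rw [if_pos hg', if_pos hg']
          have key : pvDfs2 A R C a t' (i + d.1) (j + d.2) =
              pvDfs2 A R C b t' (i + d.1) (j + d.2) := by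
            refine IH (pvNu R C t'.1) (by omega) t' _ _ a b le_rfl (by omega) (by omega)
          rw [key]
          refine ihds _ ?_
          have hmono := pv_nu_mono R C t'.1 (pvDfs2 A R C b t' (i + d.1) (j + d.2)).1
            (pv_dfs2_mono A R C b t' (i + d.1) (j + d.2))
          omega
        · rw [if_neg hg, if_neg hg]
          exact ihds t hnut
    exact aux pvDij s le_rfl

theorem pv_stab1 (A : List (List String)) (R C : Int) :
    ∀ n (vis : PySem.Set (Int × Int)) (i j : Int) (f f' : Nat),
      (i, j) ∈ pvCells R C → pvNu R C vis ≤ n → n + 1 ≤ f → n + 1 ≤ f' →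
      pvDfs1 A R C f vis i j = pvDfs1 A R C f' vis i j := by
  intro n
  induction n using Nat.strong_induction_on with
  | _ n IH =>
    intro vis i j f f' hij hnu hf hf'
    obtain ⟨a, rfl⟩ : ∃ a, f = a + 1 := ⟨f - 1, by omega⟩
    obtain ⟨b, rfl⟩ : ∃ b, f' = b + 1 := ⟨f' - 1, by omega⟩
    rw [pvDfs1, pvDfs1]
    by_cases hv : PySem.Set.contains vis (i, j) = true
    · rw [if_pos hv, if_pos hv]
    · rw [if_neg hv, if_neg hv]
      have hnvij : ¬ (i, j) ∈ vis := by
        intro hmem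
        rw [← PySem.Set.contains_iff vis (i, j)] at hmem
        exact hv hmem
      have hlt1 : pvNu R C (PySem.Set.add vis (i, j)) < pvNu R C vis :=
        pv_nu_add_lt R C vis (i, j) hij hnvij
      have aux : ∀ (ds : List (Int × Int)) (t : PySem.Set (Int × Int)),
          pvNu R C t ≤ pvNu R C (PySem.Set.add vis (i, j)) →
          ds.foldl (fun vis d =>
            if pvOk A R C (i + d.1) (j + d.2) then pvDfs1 A R C a vis (i + d.1) (j + d.2)
            else vis) t =
          ds.foldl (fun vis d =>
            if pvOk A R C (i + d.1) (j + d.2) then pvDfs1 A R C b vis (i + d.1) (j + d.2)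
            else vis) t := by
        intro ds
        induction ds with
        | nil => intro t _; rfl
        | cons d ds ihds =>
          intro t hnut
          simp only [List.foldl_cons]
          by_cases hg : pvOk A R C (i + d.1) (j + d.2) = true
          · have hcell := pv_ok_mem_cells A R C (i + d.1) (j + d.2) hg
            rw [if_pos hg, if_pos hg]
            have key : pvDfs1 A R C a t (i + d.1) (j + d.2) =
                pvDfs1 A R C b t (i + d.1) (j + d.2) :=
              IH (pvNu R C t) (by omega) t _ _ a b hcell le_rfl (by omega) (by omega)
            rw [key]
            refine ihds _ ?_
            have hmono := pv_nu_mono R C t (pvDfs1 A R C b t (i + d.1) (j + d.2))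
              (pv_dfs1_mono A R C b t (i + d.1) (j + d.2))
            omega
          · rw [if_neg hg, if_neg hg]
            exact ihds t hnut
      exact aux pvDij (PySem.Set.add vis (i, j)) le_rfl

theorem pv_bridge (A : List (List String)) (R C : Int) :
    ∀ n (vis : PySem.Set (Int × Int)) (g : List (List String)) (i j : Int),
      (i, j) ∈ pvCells R C → pvNu R C vis ≤ n →
      pvL1 A R C vis i j =
        (if PySem.Set.contains vis (i, j) then (vis, g)
         else pvL2 A R C (PySem.Set.add vis (i, j), g) i j).1 := by
  intro n
  induction n using Nat.strong_induction_on with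
  | _ n IH =>
    intro vis g i j hij hnu
    simp only [pvL1]
    rw [pvDfs1]
    by_cases hv : PySem.Set.contains vis (i, j) = true
    · rw [if_pos hv, if_pos hv]
    · rw [if_neg hv, if_neg hv]
      have hnvij : ¬ (i, j) ∈ vis := by
        intro hmem
        rw [← PySem.Set.contains_iff vis (i, j)] at hmem
        exact hv hmem
      have hlt1 : pvNu R C (PySem.Set.add vis (i, j)) < pvNu R C vis :=
        pv_nu_add_lt R C vis (i, j) hij hnvij
      simp only [pvL2]
      rw [pvDfs2]
      have aux : ∀ (ds : List (Int × Int)) (t : PySem.Set (Int × Int) × List (List String)),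
          pvNu R C t.1 ≤ pvNu R C (PySem.Set.add vis (i, j)) →
          ds.foldl (fun w d =>
            if pvOk A R C (i + d.1) (j + d.2) then
              pvDfs1 A R C (pvNu R C vis) w (i + d.1) (j + d.2)
            else w) t.1 =
          (ds.foldl (fun s d =>
            if pvOk A R C (i + d.1) (j + d.2) &&
                !(PySem.Set.contains s.1 (i + d.1, j + d.2)) then
              pvDfs2 A R C (pvNu R C (PySem.Set.add vis (i, j)))
                (PySem.Set.add s.1 (i + d.1, j + d.2),
                  pvEdge s.2 i j d.1 d.2 (i + d.1) (j + d.2))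
                (i + d.1) (j + d.2)
            else s) t).1 := by
        intro ds
        induction ds with
        | nil => intro t _; rfl
        | cons d ds ihds =>
          intro t hnut
          simp only [List.foldl_cons]
          by_cases hok : pvOk A R C (i + d.1) (j + d.2) = true
          · by_cases hmem : (i + d.1, j + d.2) ∈ t.1
            · -- already visited: the entry check stops the recursive call; the edge guard is false
              have hct : PySem.Set.contains t.1 (i + d.1, j + d.2) = true := by
                rw [PySem.Set.contains_iff]; exact hmem
              have hgf : ¬ (pvOk A R C (i + d.1) (j + d.2) &&
                  !(PySem.Set.contains t.1 (i + d.1, j + d.2))) = true := by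
                rw [hct]; simp
              rw [if_pos hok, if_neg hgf]
              have hstop : pvDfs1 A R C (pvNu R C vis) t.1 (i + d.1) (j + d.2) = t.1 := by
                obtain ⟨m, hm⟩ : ∃ m, pvNu R C vis = m + 1 := ⟨pvNu R C vis - 1, by omega⟩
                rw [hm, pvDfs1, if_pos hct]
              rw [hstop]
              exact ihds t hnut
            · -- a fresh cell: both sides descend
              have hcell := pv_ok_mem_cells A R C (i + d.1) (j + d.2) hok
              have hct : PySem.Set.contains t.1 (i + d.1, j + d.2) = false := by
                rw [← Bool.not_eq_true, PySem.Set.contains_iff]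
                exact hmem
              have hgt : (pvOk A R C (i + d.1) (j + d.2) &&
                  !(PySem.Set.contains t.1 (i + d.1, j + d.2))) = true := by
                rw [hok, hct]; rfl
              rw [if_pos hok, if_pos hgt]
              have hlt2 : pvNu R C (PySem.Set.add t.1 (i + d.1, j + d.2)) < pvNu R C t.1 :=
                pv_nu_add_lt R C t.1 (i + d.1, j + d.2) hcell hmem
              -- left recursive call at the stabilized fuel
              have hL : pvDfs1 A R C (pvNu R C vis) t.1 (i + d.1) (j + d.2) =
                  pvL1 A R C t.1 (i + d.1) (j + d.2) :=
                pv_stab1 A R C (pvNu R C t.1) t.1 (i + d.1) (j + d.2) _ _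
                  hcell le_rfl (by omega) (by omega)
              -- right recursive call at the stabilized fuel
              have hR : pvDfs2 A R C (pvNu R C (PySem.Set.add vis (i, j)))
                    (PySem.Set.add t.1 (i + d.1, j + d.2),
                      pvEdge t.2 i j d.1 d.2 (i + d.1) (j + d.2)) (i + d.1) (j + d.2) =
                  pvL2 A R C (PySem.Set.add t.1 (i + d.1, j + d.2),
                      pvEdge t.2 i j d.1 d.2 (i + d.1) (j + d.2)) (i + d.1) (j + d.2) :=
                pv_stab2 A R C (pvNu R C (PySem.Set.add t.1 (i + d.1, j + d.2))) _
                  (i + d.1) (j + d.2) _ _ le_rfl (by omega) (le_of_eq rfl)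
              have hIH := IH (pvNu R C t.1) (by omega) t.1
                (pvEdge t.2 i j d.1 d.2 (i + d.1) (j + d.2)) (i + d.1) (j + d.2)
                hcell le_rfl
              rw [if_neg (by rw [hct]; simp : ¬ PySem.Set.contains t.1 (i + d.1, j + d.2) = true)] at hIH
              rw [hL, hIH, hR]
              refine ihds _ ?_
              simp only [pvL2]
              have hmono := pv_nu_mono R C (PySem.Set.add t.1 (i + d.1, j + d.2))
                (pvDfs2 A R C (pvNu R C (PySem.Set.add t.1 (i + d.1, j + d.2)) + 1)
                  (PySem.Set.add t.1 (i + d.1, j + d.2),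
                    pvEdge t.2 i j d.1 d.2 (i + d.1) (j + d.2)) (i + d.1) (j + d.2)).1
                (pv_dfs2_mono A R C (pvNu R C (PySem.Set.add t.1 (i + d.1, j + d.2)) + 1)
                  (PySem.Set.add t.1 (i + d.1, j + d.2),
                    pvEdge t.2 i j d.1 d.2 (i + d.1) (j + d.2)) (i + d.1) (j + d.2))
              omega
          · have hgf : ¬ (pvOk A R C (i + d.1) (j + d.2) &&
                !(PySem.Set.contains t.1 (i + d.1, j + d.2))) = true := by
              simp [hok]
            rw [if_neg hok, if_neg hgf]
            exact ihds t hnut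
      exact aux pvDij (PySem.Set.add vis (i, j), g) (le_of_eq rfl)

theorem pv_foldFrom_zero (A : List (List String)) (R C : Int)
    (s : PySem.Set (Int × Int) × List (List String)) (i j : Int) :
    pvFoldFrom A R C s i j 0 = pvL2 A R C s i j := by
  simp only [pvFoldFrom, List.drop_zero, pvL2]
  rw [pvDfs2]
  have aux : ∀ (ds : List (Int × Int)) (t : PySem.Set (Int × Int) × List (List String)),
      pvNu R C t.1 ≤ pvNu R C s.1 →
      ds.foldl (fun t d =>
        if pvOk A R C (i + d.1) (j + d.2) && !(PySem.Set.contains t.1 (i + d.1, j + d.2)) then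
          pvL2 A R C
            (PySem.Set.add t.1 (i + d.1, j + d.2), pvEdge t.2 i j d.1 d.2 (i + d.1) (j + d.2))
            (i + d.1) (j + d.2)
        else t) t =
      ds.foldl (fun t d =>
        if pvOk A R C (i + d.1) (j + d.2) && !(PySem.Set.contains t.1 (i + d.1, j + d.2)) then
          pvDfs2 A R C (pvNu R C s.1)
            (PySem.Set.add t.1 (i + d.1, j + d.2), pvEdge t.2 i j d.1 d.2 (i + d.1) (j + d.2))
            (i + d.1) (j + d.2)
        else t) t := by
    intro ds
    induction ds with
    | nil => intro t _; rfl
    | cons d ds ihds =>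
      intro t hnut
      simp only [List.foldl_cons]
      by_cases hg : (pvOk A R C (i + d.1) (j + d.2) &&
          !(PySem.Set.contains t.1 (i + d.1, j + d.2))) = true
      · rw [Bool.and_eq_true] at hg
        obtain ⟨hok, hnc⟩ := hg
        have hnv : ¬ (i + d.1, j + d.2) ∈ t.1 := by
          rw [Bool.not_eq_true'] at hnc
          intro hmem
          rw [← PySem.Set.contains_iff t.1 (i + d.1, j + d.2)] at hmem
          rw [hmem] at hnc; cases hnc
        have hcell := pv_ok_mem_cells A R C (i + d.1) (j + d.2) hok
        have hlt : pvNu R C (PySem.Set.add t.1 (i + d.1, j + d.2)) < pvNu R C t.1 :=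
          pv_nu_add_lt R C t.1 (i + d.1, j + d.2) hcell hnv
        have hg' : (pvOk A R C (i + d.1) (j + d.2) &&
            !(PySem.Set.contains t.1 (i + d.1, j + d.2))) = true := by
          rw [Bool.and_eq_true]; exact ⟨hok, hnc⟩
        rw [if_pos hg', if_pos hg']
        have key : pvL2 A R C
            (PySem.Set.add t.1 (i + d.1, j + d.2), pvEdge t.2 i j d.1 d.2 (i + d.1) (j + d.2))
            (i + d.1) (j + d.2) =
            pvDfs2 A R C (pvNu R C s.1)
              (PySem.Set.add t.1 (i + d.1, j + d.2), pvEdge t.2 i j d.1 d.2 (i + d.1) (j + d.2))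
              (i + d.1) (j + d.2) := by
          simp only [pvL2]
          exact pv_stab2 A R C (pvNu R C (PySem.Set.add t.1 (i + d.1, j + d.2)))
            (PySem.Set.add t.1 (i + d.1, j + d.2), pvEdge t.2 i j d.1 d.2 (i + d.1) (j + d.2))
            (i + d.1) (j + d.2) _ _ (le_of_eq rfl) (le_of_eq rfl) (by omega)
        rw [key]
        refine ihds _ ?_
        have hmono := pv_nu_mono R C (PySem.Set.add t.1 (i + d.1, j + d.2))
          (pvDfs2 A R C (pvNu R C s.1)
            (PySem.Set.add t.1 (i + d.1, j + d.2), pvEdge t.2 i j d.1 d.2 (i + d.1) (j + d.2))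
            (i + d.1) (j + d.2)).1
          (pv_dfs2_mono A R C (pvNu R C s.1)
            (PySem.Set.add t.1 (i + d.1, j + d.2), pvEdge t.2 i j d.1 d.2 (i + d.1) (j + d.2))
            (i + d.1) (j + d.2))
        omega
      · rw [if_neg hg, if_neg hg]
        exact ihds t hnut
  exact aux pvDij s le_rfl

theorem pv_dij_drop (k : Nat) (hk : k < 4) :
    pvDij.drop k = pvDij.getD k (0, 0) :: pvDij.drop (k + 1) := by
  interval_cases k <;> rfl

theorem pv_foldFrom_step (A : List (List String)) (R C : Int)
    (s : PySem.Set (Int × Int) × List (List String)) (i j : Int) (k : Nat) (hk : k < 4) :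
    pvFoldFrom A R C s i j k =
      pvFoldFrom A R C
        (if pvOk A R C (i + (pvDij.getD k (0, 0)).1) (j + (pvDij.getD k (0, 0)).2) &&
            !(PySem.Set.contains s.1
              (i + (pvDij.getD k (0, 0)).1, j + (pvDij.getD k (0, 0)).2)) then
          pvL2 A R C
            (PySem.Set.add s.1 (i + (pvDij.getD k (0, 0)).1, j + (pvDij.getD k (0, 0)).2),
              pvEdge s.2 i j (pvDij.getD k (0, 0)).1 (pvDij.getD k (0, 0)).2
                (i + (pvDij.getD k (0, 0)).1) (j + (pvDij.getD k (0, 0)).2))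
            (i + (pvDij.getD k (0, 0)).1) (j + (pvDij.getD k (0, 0)).2)
        else s) i j (k + 1) := by
  simp only [pvFoldFrom]
  rw [pv_dij_drop k hk, List.foldl_cons]

theorem pv_foldFrom_four (A : List (List String)) (R C : Int)
    (s : PySem.Set (Int × Int) × List (List String)) (i j : Int) :
    pvFoldFrom A R C s i j 4 = s := rfl

theorem pv_machine (A : List (List String)) (R C : Int) :
    ∀ N (s : PySem.Set (Int × Int) × List (List String)) (stack : List (Int × Int × Nat))
      (m : Nat), (∀ fr ∈ stack, fr.2.2 ≤ 4) → pvMeasure R C s stack ≤ N →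
      pvMeasure R C s stack ≤ m → pvLoop A R C m s stack = pvExec A R C s stack := by
  intro N
  induction N using Nat.strong_induction_on with
  | _ N IH =>
    intro s stack m hfr hN hm
    match stack with
    | [] => cases m <;> rfl
    | (i, j, k) :: rest =>
      have hk4 : k ≤ 4 := hfr (i, j, k) List.mem_cons_self
      have hw : 2 ≤ 6 - k := by omega
      have hMlow : 6 - k ≤ pvMeasure R C s ((i, j, k) :: rest) := by
        simp only [pvMeasure, List.map_cons, List.sum_cons]
        omega
      obtain ⟨m', rfl⟩ : ∃ m', m = m' + 1 := ⟨m - 1, by omega⟩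
      rw [pvLoop]
      by_cases hk : k < 4
      · rw [if_pos hk]
        show (if (pvOk A R C (i + (pvDij.getD k (0, 0)).1) (j + (pvDij.getD k (0, 0)).2) &&
            !(PySem.Set.contains s.1
              (i + (pvDij.getD k (0, 0)).1, j + (pvDij.getD k (0, 0)).2))) = true then
            pvLoop A R C m'
              (PySem.Set.add s.1 (i + (pvDij.getD k (0, 0)).1, j + (pvDij.getD k (0, 0)).2),
                pvEdge s.2 i j (pvDij.getD k (0, 0)).1 (pvDij.getD k (0, 0)).2
                  (i + (pvDij.getD k (0, 0)).1) (j + (pvDij.getD k (0, 0)).2))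
              ((i + (pvDij.getD k (0, 0)).1, j + (pvDij.getD k (0, 0)).2, 0) ::
                (i, j, k + 1) :: rest)
          else pvLoop A R C m' s ((i, j, k + 1) :: rest)) =
          pvExec A R C s ((i, j, k) :: rest)
        by_cases hg : (pvOk A R C (i + (pvDij.getD k (0, 0)).1) (j + (pvDij.getD k (0, 0)).2) &&
            !(PySem.Set.contains s.1
              (i + (pvDij.getD k (0, 0)).1, j + (pvDij.getD k (0, 0)).2))) = true
        · rw [if_pos hg]
          rw [Bool.and_eq_true] at hg
          obtain ⟨hok, hnc⟩ := hg
          have hnv : ¬ (i + (pvDij.getD k (0, 0)).1, j + (pvDij.getD k (0, 0)).2) ∈ s.1 := by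
            rw [Bool.not_eq_true'] at hnc
            intro hmem
            rw [← PySem.Set.contains_iff s.1
              (i + (pvDij.getD k (0, 0)).1, j + (pvDij.getD k (0, 0)).2)] at hmem
            rw [hmem] at hnc; cases hnc
          have hcell := pv_ok_mem_cells A R C
            (i + (pvDij.getD k (0, 0)).1) (j + (pvDij.getD k (0, 0)).2) hok
          have hlt : pvNu R C
              (PySem.Set.add s.1 (i + (pvDij.getD k (0, 0)).1, j + (pvDij.getD k (0, 0)).2)) <
              pvNu R C s.1 :=
            pv_nu_add_lt R C s.1 _ hcell hnv
          have hMlt : pvMeasure R C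
              (PySem.Set.add s.1 (i + (pvDij.getD k (0, 0)).1, j + (pvDij.getD k (0, 0)).2),
                pvEdge s.2 i j (pvDij.getD k (0, 0)).1 (pvDij.getD k (0, 0)).2
                  (i + (pvDij.getD k (0, 0)).1) (j + (pvDij.getD k (0, 0)).2))
              ((i + (pvDij.getD k (0, 0)).1, j + (pvDij.getD k (0, 0)).2, 0) ::
                (i, j, k + 1) :: rest) + 1 ≤
              pvMeasure R C s ((i, j, k) :: rest) := by
            simp only [pvMeasure, List.map_cons, List.sum_cons]
            omega
          have hfr' : ∀ fr ∈ ((i + (pvDij.getD k (0, 0)).1, j + (pvDij.getD k (0, 0)).2, 0) ::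
              (i, j, k + 1) :: rest : List (Int × Int × Nat)), fr.2.2 ≤ 4 := by
            intro fr hfrm
            rcases List.mem_cons.mp hfrm with rfl | hfrm
            · exact Nat.zero_le 4
            · rcases List.mem_cons.mp hfrm with rfl | hfrm
              · show k + 1 ≤ 4; omega
              · exact hfr fr (List.mem_cons_of_mem _ hfrm)
          rw [IH (pvMeasure R C
              (PySem.Set.add s.1 (i + (pvDij.getD k (0, 0)).1, j + (pvDij.getD k (0, 0)).2),
                pvEdge s.2 i j (pvDij.getD k (0, 0)).1 (pvDij.getD k (0, 0)).2
                  (i + (pvDij.getD k (0, 0)).1) (j + (pvDij.getD k (0, 0)).2))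
              ((i + (pvDij.getD k (0, 0)).1, j + (pvDij.getD k (0, 0)).2, 0) ::
                (i, j, k + 1) :: rest)) (by omega) _ _ m' hfr' le_rfl (by omega)]
          conv_lhs => rw [pvExec]
          rw [pv_foldFrom_zero]
          conv_lhs => rw [pvExec]
          conv_rhs => rw [pvExec, pv_foldFrom_step A R C s i j k hk]
          rw [if_pos (by rw [Bool.and_eq_true]; exact ⟨hok, hnc⟩)]
        · rw [if_neg hg]
          have hMlt : pvMeasure R C s ((i, j, k + 1) :: rest) + 1 ≤
              pvMeasure R C s ((i, j, k) :: rest) := by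
            simp only [pvMeasure, List.map_cons, List.sum_cons]
            omega
          have hfr' : ∀ fr ∈ ((i, j, k + 1) :: rest : List (Int × Int × Nat)), fr.2.2 ≤ 4 := by
            intro fr hfrm
            rcases List.mem_cons.mp hfrm with rfl | hfrm
            · show k + 1 ≤ 4; omega
            · exact hfr fr (List.mem_cons_of_mem _ hfrm)
          rw [IH (pvMeasure R C s ((i, j, k + 1) :: rest)) (by omega) _ _ m' hfr' le_rfl
            (by omega)]
          conv_lhs => rw [pvExec]
          conv_rhs => rw [pvExec, pv_foldFrom_step A R C s i j k hk]
          rw [if_neg hg]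
      · rw [if_neg hk]
        have hk4' : k = 4 := by omega
        subst hk4'
        have hMlt : pvMeasure R C s rest + 2 ≤ pvMeasure R C s ((i, j, 4) :: rest) := by
          simp only [pvMeasure, List.map_cons, List.sum_cons]
          omega
        have hfr' : ∀ fr ∈ rest, fr.2.2 ≤ 4 := fun fr hfrm =>
          hfr fr (List.mem_cons_of_mem _ hfrm)
        rw [IH (pvMeasure R C s rest) (by omega) _ _ m' hfr' le_rfl (by omega)]
        conv_rhs => rw [pvExec, pv_foldFrom_four]

theorem pv_cells_length (R C : Int) :
    (pvCells R C).length = R.toNat * C.toNat + 1 := by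
  simp only [pvCells, List.length_cons, List.length_flatMap]
  have hsum : ∀ l : List Int, (l.map (fun _ => C.toNat)).sum = l.length * C.toNat := by
    intro l; induction l with
    | nil => simp
    | cons a l ih =>
      simp only [List.map_cons, List.sum_cons, ih, List.length_cons]
      ring
  have hmapeq : List.map (fun a : Int =>
      (List.map (fun j => (a, j)) (PySem.List.pyRange 0 C 1)).length)
      (PySem.List.pyRange 0 R 1) =
      List.map (fun _ => C.toNat) (PySem.List.pyRange 0 R 1) := by
    apply List.map_congr_left
    intro a _
    simp [PySem.List.length_pyRange_one]
  rw [hmapeq, hsum, PySem.List.length_pyRange_one]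
  simp

theorem pv_main (A : List (List String)) (R C : Int) : solution A R C = solution_alt A R C := by
  have hcells := pv_cells_length R C
  have hmem00 : ((0 : Int), (0 : Int)) ∈ pvCells R C := List.mem_cons_self
  have hnuE := pv_nu_le R C PySem.Set.empty
  have hnu0 := pv_nu_le R C (PySem.Set.add PySem.Set.empty ((0 : Int), (0 : Int)))
  have hA1 : pvDfs1 A R C (pvFuel R C) PySem.Set.empty 0 0 =
      pvL1 A R C PySem.Set.empty 0 0 :=
    pv_stab1 A R C (pvNu R C PySem.Set.empty) PySem.Set.empty 0 0 (pvFuel R C)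
      (pvNu R C PySem.Set.empty + 1) hmem00 le_rfl (by simp only [pvFuel]; omega) le_rfl
  have hnc : ¬ PySem.Set.contains PySem.Set.empty ((0 : Int), (0 : Int)) = true := by
    rw [PySem.Set.contains_iff]
    simp [PySem.Set.empty]
  have hBr := pv_bridge A R C (pvNu R C PySem.Set.empty) PySem.Set.empty (pvInitPtrs R C)
    0 0 hmem00 le_rfl
  rw [if_neg hnc] at hBr
  have hA2 : pvDfs2 A R C (pvFuel R C)
      (PySem.Set.add PySem.Set.empty (0, 0), pvInitPtrs R C) 0 0 =
      pvL2 A R C (PySem.Set.add PySem.Set.empty (0, 0), pvInitPtrs R C) 0 0 := by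
    simp only [pvL2]
    exact pv_stab2 A R C (pvNu R C (PySem.Set.add PySem.Set.empty (0, 0)))
      (PySem.Set.add PySem.Set.empty (0, 0), pvInitPtrs R C) 0 0 _ _
      (le_of_eq rfl) (by simp only [pvFuel]; omega) (le_of_eq rfl)
  have hB : pvLoop A R C (pvLoopFuel R C)
      (PySem.Set.add PySem.Set.empty (0, 0), pvInitPtrs R C) [(0, 0, 0)] =
      pvL2 A R C (PySem.Set.add PySem.Set.empty (0, 0), pvInitPtrs R C) 0 0 := by
    rw [pv_machine A R C
      (pvMeasure R C (PySem.Set.add PySem.Set.empty (0, 0), pvInitPtrs R C) [(0, 0, 0)])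
      _ _ _ (by intro fr hfrm; rcases List.mem_singleton.mp hfrm with rfl; exact Nat.zero_le 4)
      le_rfl
      (by simp only [pvMeasure, pvLoopFuel, List.map_cons, List.sum_cons, List.map_nil,
        List.sum_nil]; omega)]
    rw [pvExec, pvExec, pv_foldFrom_zero]
  simp only [solution, solution_alt]
  rw [hA1, hBr, hA2, hB]

-- ===== VERDICT (by name: the statement is the Claim_ definition above) =====
theorem solution_spec : Claim_equal_solution := by
  intro A R C _ _
  unfold Spec_solution
  exact pv_main A R C
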